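-- pv_equiv track=rewrite | github.com/RodrigoPinto22/Projeto-EIACD | create_board.py | alinhar_ramo
-- ===== SOURCE A (Python) =====
-- def alinhar_ramo(ramo):
--     j = 0
--     for i in range(len(ramo)):
--         if ramo[i] != " ":
--             ramo[j] = ramo[i]
--             if j != i:
--                 ramo[i] = " "
--             j += 1
--     return ramo
-- ===== SOURCE B (Python) =====
-- def alinhar_ramo(ramo):
--     kept = [x for x in ramo if x != " "]
--     ramo[:] = kept + [" "] * (len(ramo) - len(kept))
--     return ramo
-- ===== Notes on version B (the rewrite author's own statement) =====
-- stated objective: simpler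
-- what changed: Replaces the in-place index/two-pointer compaction loop over positions with a filter of the non-space elements followed by padding with spaces to the original length (written back via slice assignment to keep the in-place mutation).
import Mathlib
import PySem

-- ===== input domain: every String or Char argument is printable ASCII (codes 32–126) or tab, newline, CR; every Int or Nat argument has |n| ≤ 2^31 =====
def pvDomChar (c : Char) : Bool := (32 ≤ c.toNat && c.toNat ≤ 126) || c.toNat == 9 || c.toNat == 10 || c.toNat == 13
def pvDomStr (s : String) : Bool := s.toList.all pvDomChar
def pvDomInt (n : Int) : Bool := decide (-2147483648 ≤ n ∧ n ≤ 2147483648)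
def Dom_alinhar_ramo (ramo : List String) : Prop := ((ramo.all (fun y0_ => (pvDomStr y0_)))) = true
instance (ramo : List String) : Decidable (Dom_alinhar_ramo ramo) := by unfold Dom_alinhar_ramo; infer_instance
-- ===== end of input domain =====

-- B replaces A's in-place two-pointer compaction loop by a filter of the non-space
-- elements followed by space padding to the original length (objective: simpler).
-- Equivalence is about the return value; both Pythons mutate `ramo` in place identically.

-- ===== PORT A =====
-- one iteration of A's `for i in range(len(ramo))` body, state = (ramo, j)
def alinharStepA (st : List String × Nat) (i : Nat) : List String × Nat :=
  let l := st.1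
  let j := st.2
  if l.getD i "" ≠ " " then
    let l2 := l.set j (l.getD i "")
    let l3 := if j ≠ i then l2.set i " " else l2
    (l3, j + 1)
  else
    st

def alinhar_ramo (ramo : List String) : List String :=
  ((List.range ramo.length).foldl alinharStepA (ramo, 0)).1

-- ===== PORT B =====
def alinhar_ramo_alt (ramo : List String) : List String :=
  let kept := ramo.filter (fun x => x ≠ " ")
  kept ++ List.replicate (ramo.length - kept.length) " "

-- ===== PRECONDITION & SPEC =====
def Spec_alinhar_ramo (ramo : List String) (out : List String) : Prop := out = alinhar_ramo_alt ramo
instance (ramo : List String) (out : List String) : Decidable (Spec_alinhar_ramo ramo out) := by unfold Spec_alinhar_ramo; infer_instance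

-- ===== CLAIM (what is proved, stated in full; the proofs are below) =====
def Claim_equal_alinhar_ramo : Prop := ∀ (ramo : List String), Dom_alinhar_ramo ramo → Spec_alinhar_ramo ramo (alinhar_ramo ramo)

-- ===== LEMMAS AND PROOFS =====

-- set at exactly the length of a known prefix
theorem set_at_prefix_len (P : List String) (y : String) (t : List String) (x : String)
    (i : Nat) (h : i = P.length) : (P ++ y :: t).set i x = P ++ x :: t := by
  subst h
  rw [List.set_append_right _ _ (le_refl _)]
  simp

theorem getD_at_prefix_len (P : List String) (y : String) (t : List String)
    (i : Nat) (h : i = P.length) : (P ++ y :: t).getD i "" = y := by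
  subst h
  rw [List.getD, List.getElem?_append_right (le_refl _)]
  simp

-- Effect of one loop iteration on the invariant shape
-- F ++ replicate (s-k) " " ++ drop s L  with  F.length = k <= s < L.length.
theorem alinhar_step_eq (L F : List String) (s k : Nat) (hF : F.length = k)
    (hk : k ≤ s) (hs : s < L.length) :
    alinharStepA (F ++ List.replicate (s - k) " " ++ L.drop s, k) s =
      (if L[s] ≠ " " then
        (F ++ [L[s]] ++ List.replicate (s - k) " " ++ L.drop (s + 1), k + 1)
       else
        (F ++ List.replicate (s + 1 - k) " " ++ L.drop (s + 1), k)) := by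
  subst hF
  have hdrop : L.drop s = L[s] :: L.drop (s + 1) := List.drop_eq_getElem_cons hs
  have hget : (F ++ List.replicate (s - F.length) " " ++ L.drop s).getD s "" = L[s] := by
    rw [hdrop]
    exact getD_at_prefix_len _ _ _ _ (by simp only [List.length_append, List.length_replicate]; omega)
  by_cases hx : L[s] = " "
  · -- space: the loop body does nothing; padding absorbs the space
    simp only [alinharStepA, hget, hx, ne_eq, not_true_eq_false, if_false]
    rw [hdrop, ← hx, show s + 1 - F.length = (s - F.length) + 1 by omega,
        List.replicate_succ', List.append_assoc]
    simp [hx]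
  · simp only [alinharStepA, hget, ne_eq, hx, not_false_eq_true, if_true]
    rcases Nat.eq_or_lt_of_le hk with hke | hkl
    · -- j = i : write at position s its own value, no second write
      have h0 : s - F.length = 0 := by omega
      have hset : (F ++ List.replicate (s - F.length) " " ++ L.drop s).set F.length L[s]
          = F ++ List.replicate (s - F.length) " " ++ L.drop s := by
        rw [h0, hdrop]
        simp only [List.replicate_zero, List.append_nil]
        exact set_at_prefix_len _ _ _ _ _ rfl
      rw [hset, if_neg (by omega)]
      rw [h0, hdrop]
      simp
    · -- j < i : write L[s] at position j = F.length, then a space at position i = s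
      obtain ⟨d, hd⟩ : ∃ d, s - F.length = d + 1 := ⟨s - F.length - 1, by omega⟩
      have hset1 : (F ++ List.replicate (s - F.length) " " ++ L.drop s).set F.length L[s]
          = F ++ L[s] :: (List.replicate d " " ++ L.drop s) := by
        rw [hd, List.replicate_succ, List.append_assoc]
        exact set_at_prefix_len _ _ _ _ _ rfl
      have hset2 : (F ++ L[s] :: (List.replicate d " " ++ L.drop s)).set s " "
          = F ++ L[s] :: (List.replicate d " " ++ " " :: L.drop (s + 1)) := by
        have hre : F ++ L[s] :: (List.replicate d " " ++ L.drop s)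
            = (F ++ L[s] :: List.replicate d " ") ++ L.drop s := by simp
        have hre2 : F ++ L[s] :: (List.replicate d " " ++ " " :: L.drop (s + 1))
            = (F ++ L[s] :: List.replicate d " ") ++ " " :: L.drop (s + 1) := by simp
        rw [hre, hre2, hdrop]
        exact set_at_prefix_len _ _ _ _ _ (by simp; omega)
      rw [hset1, if_pos (by omega), hset2, hd, List.replicate_succ']
      simp

-- Loop invariant carried through the remaining iterations [s, s+m).
theorem alinhar_loop_inv (L : List String) (m : Nat) : ∀ s, s + m = L.length →
    (List.range' s m).foldl alinharStepA
      ((L.take s).filter (fun x => x ≠ " ")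
        ++ List.replicate (s - ((L.take s).filter (fun x => x ≠ " ")).length) " "
        ++ L.drop s,
       ((L.take s).filter (fun x => x ≠ " ")).length)
    = (L.filter (fun x => x ≠ " ")
        ++ List.replicate (L.length - (L.filter (fun x => x ≠ " ")).length) " ",
       (L.filter (fun x => x ≠ " ")).length) := by
  induction m with
  | zero =>
    intro s hs
    have : s = L.length := by omega
    subst this
    simp
  | succ m ih =>
    intro s hs
    have hs' : s < L.length := by omega
    have hk : ((L.take s).filter (fun x => x ≠ " ")).length ≤ s := by
      calc ((L.take s).filter (fun x => x ≠ " ")).length ≤ (L.take s).length :=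
            List.length_filter_le _ _
        _ ≤ s := by simp
    rw [List.range'_succ, List.foldl_cons,
        alinhar_step_eq L _ s _ rfl hk hs']
    have htake : L.take (s + 1) = L.take s ++ [L[s]] := List.take_succ_eq_append_getElem hs'
    by_cases hx : L[s] = " "
    · rw [if_neg (by simp [hx])]
      have hfilt : (L.take (s + 1)).filter (fun x => x ≠ " ")
          = (L.take s).filter (fun x => x ≠ " ") := by
        rw [htake, List.filter_append]
        simp [hx]
      have := ih (s + 1) (by omega)
      rw [hfilt] at this
      exact this
    · rw [if_pos (by simp [hx])]
      have hfilt : (L.take (s + 1)).filter (fun x => x ≠ " ")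
          = (L.take s).filter (fun x => x ≠ " ") ++ [L[s]] := by
        rw [htake, List.filter_append]
        simp [hx]
      have := ih (s + 1) (by omega)
      rw [hfilt] at this
      simp only [List.length_append, List.length_cons, List.length_nil] at this
      rw [show s + 1 - (((L.take s).filter (fun x => x ≠ " ")).length + (0 + 1))
            = s - ((L.take s).filter (fun x => x ≠ " ")).length by omega] at this
      simpa using this

-- ===== VERDICT (by name: the statement is the Claim_ definition above) =====
theorem alinhar_ramo_spec : Claim_equal_alinhar_ramo := by
  intro ramo _
  unfold Spec_alinhar_ramo alinhar_ramo alinhar_ramo_alt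
  have := alinhar_loop_inv ramo ramo.length 0 (by omega)
  simp only [List.take_zero, List.filter_nil, List.length_nil, Nat.zero_sub,
    List.replicate_zero, List.nil_append, List.drop_zero] at this
  rw [List.range_eq_range', this]
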